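-- pv_equiv track=rewrite | github.com/kjhickman/advent-of-code | 2025/solutions/day06.py | part2
-- ===== SOURCE A (Python) =====
-- def part2(lines: list[str]) -> int:
--     max_col = max(len(line) for line in lines)
--     grid = [list(line.ljust(max_col)) for line in lines]
--     num_rows = len(grid) - 1  # exclude operator row
--
--     empty_cols = []
--     for col_idx in range(max_col):
--         col = [grid[row][col_idx] for row in range(num_rows)]
--         is_empty = all(c == ' ' for c in col)
--         if is_empty:
--             empty_cols.append(col_idx)
--
--     problem_ranges = []
--     start = 0
--     for empty_col in empty_cols:
--         if start < empty_col:
--             problem_ranges.append((start, empty_col - 1))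
--         start = empty_col + 1
--
--     # last problem
--     if start < max_col:
--         problem_ranges.append((start, max_col - 1))
--
--     operator_row = grid[-1]
--     total = 0
--     for start, end in problem_ranges:
--         problem_cols_indices = list(range(start, end + 1))
--         operator = None
--         for col_idx in problem_cols_indices:
--             if operator_row[col_idx] in ['+', '*']:
--                 operator = operator_row[col_idx]
--                 break
--
--         numbers = []
--         for col_idx in problem_cols_indices:
--             col = [grid[row][col_idx] for row in range(num_rows)]
--             num_str = ''.join(c for c in col if c != ' ')
--             if num_str:
--                 numbers.append(int(num_str))
--
--         result = compute_result(numbers, operator or '+')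
--         total += result
--
--     return total
--
-- def compute_result(numbers: list[int], operator: str) -> int:
--     """Compute result based on operator: multiply all or sum all."""
--     if operator == '*':
--         result = 1
--         for n in numbers:
--             result *= n
--         return result
--     else:  # operator == '+'
--         return sum(numbers)
-- ===== SOURCE B (Python) =====
-- def _apply(op: str, nums: list[int]) -> int:
--     if op == '*':
--         r = 1
--         for n in nums:
--             r *= n
--         return r
--     return sum(nums)
--
-- def part2(lines: list[str]) -> int:
--     width = max(len(line) for line in lines)
--     *data, ops = lines
--     total = 0
--     op = None
--     nums = []
--     for i in range(width):
--         digits = [row[i] for row in data if i < len(row) and row[i] != ' ']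
--         if not digits:
--             if nums:
--                 total += _apply(op or '+', nums)
--             op, nums = None, []
--         else:
--             nums.append(int(''.join(digits)))
--             c = ops[i] if i < len(ops) else ' '
--             if op is None and c in ('+', '*'):
--                 op = c
--     if nums:
--         total += _apply(op or '+', nums)
--     return total
-- ===== Notes on version B (the rewrite author's own statement) =====
-- stated objective: simpler
-- what changed: Replaces A's three-phase pipeline (collect empty column indices, derive problem index ranges, then re-scan the padded grid per range) by a single left-to-right pass over columns that accumulates the current group's numbers and operator and flushes the group at each separator column, with no padded grid and no range bookkeeping.
import Mathlib
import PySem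

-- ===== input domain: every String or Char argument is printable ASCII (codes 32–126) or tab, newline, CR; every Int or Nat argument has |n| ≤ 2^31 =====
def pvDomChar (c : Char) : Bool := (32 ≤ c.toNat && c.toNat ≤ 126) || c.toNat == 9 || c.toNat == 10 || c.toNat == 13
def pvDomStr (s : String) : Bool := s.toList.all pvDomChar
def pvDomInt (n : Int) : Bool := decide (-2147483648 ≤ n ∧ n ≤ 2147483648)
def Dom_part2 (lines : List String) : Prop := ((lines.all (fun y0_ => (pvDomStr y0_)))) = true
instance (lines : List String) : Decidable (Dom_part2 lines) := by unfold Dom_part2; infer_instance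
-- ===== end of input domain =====

-- B replaces A's three-phase pipeline (empty columns → index ranges → per-range grid re-scan)
-- by a single left-to-right pass over columns with a running group accumulator; equal return
-- value is proved on Pre_ (A raises elsewhere).

-- ===== PORT A =====
def computeResult (numbers : List Int) (operator : Char) : Int :=
  if operator == '*' then numbers.foldl (fun r n => r * n) 1
  else numbers.sum

def part2 (lines : List String) : Int :=
  let max_col : Int := (PySem.List.max? (lines.map (fun line => PySem.Str.len line)) (fun x => x)).getD 0
  -- line.ljust(max_col): hand-ported, exact — pad on the right with spaces up to max_col
  let grid : List (List Char) := lines.map (fun line => line.toList ++ List.replicate (max_col.toNat - line.toList.length) ' ')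
  let num_rows : Int := (grid.length : Int) - 1
  let empty_cols : List Int := (PySem.List.pyRange 0 max_col).foldl (fun acc col_idx =>
      if ((PySem.List.pyRange 0 num_rows).map (fun row =>
            PySem.List.pyGetD (PySem.List.pyGetD grid row []) col_idx ' ')).all (fun c => c == ' ')
      then acc ++ [col_idx] else acc) []
  let pr := empty_cols.foldl (fun (p : List (Int × Int) × Int) empty_col =>
      (if p.2 < empty_col then p.1 ++ [(p.2, empty_col - 1)] else p.1, empty_col + 1)) ([], 0)
  let problem_ranges : List (Int × Int) := if pr.2 < max_col then pr.1 ++ [(pr.2, max_col - 1)] else pr.1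
  let operator_row : List Char := PySem.List.pyGetD grid (-1) []
  problem_ranges.foldl (fun total se =>
      let operator : Option Char := (PySem.List.pyRange se.1 (se.2 + 1)).findSome? (fun col_idx =>
          if PySem.List.pyGetD operator_row col_idx ' ' == '+' || PySem.List.pyGetD operator_row col_idx ' ' == '*'
          then some (PySem.List.pyGetD operator_row col_idx ' ') else none)
      let numbers : List Int := (PySem.List.pyRange se.1 (se.2 + 1)).foldl (fun ns col_idx =>
          let num_str := ((PySem.List.pyRange 0 num_rows).map (fun row =>
              PySem.List.pyGetD (PySem.List.pyGetD grid row []) col_idx ' ')).filter (fun c => !(c == ' '))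
          if !num_str.isEmpty then ns ++ [(PySem.Int.ofChars? num_str).getD 0] else ns) []
      total + computeResult numbers (operator.getD '+')) 0

-- ===== PORT B =====
def applyOp (op : Char) (nums : List Int) : Int :=
  if op == '*' then nums.foldl (fun r n => r * n) 1
  else nums.sum

def part2_alt (lines : List String) : Int :=
  let width : Int := (PySem.List.max? (lines.map (fun line => PySem.Str.len line)) (fun x => x)).getD 0
  let data : List String := lines.dropLast
  let ops : String := (PySem.List.pyGet? lines (-1)).getD ""   -- *data, ops = lines
  let st : Int × Option Char × List Int := (PySem.List.pyRange 0 width).foldl (fun st i =>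
      let digits : List Char := data.filterMap (fun row =>
          if i < PySem.Str.len row ∧ PySem.List.pyGetD row.toList i ' ' ≠ ' '
          then some (PySem.List.pyGetD row.toList i ' ') else none)
      if digits.isEmpty then
        (if !st.2.2.isEmpty then st.1 + applyOp (st.2.1.getD '+') st.2.2 else st.1, none, [])
      else
        let c : Char := if i < PySem.Str.len ops then PySem.List.pyGetD ops.toList i ' ' else ' '
        (st.1,
         if st.2.1.isNone && (c == '+' || c == '*') then some c else st.2.1,
         st.2.2 ++ [(PySem.Int.ofChars? digits).getD 0])) (0, none, [])
  if !st.2.2.isEmpty then st.1 + applyOp (st.2.1.getD '+') st.2.2 else st.1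

-- ===== PRECONDITION & SPEC =====
def colChars (lines : List String) (i : Nat) : List Char :=
  lines.dropLast.filterMap (fun row =>
    if i < row.toList.length ∧ row.toList.getD i ' ' ≠ ' ' then some (row.toList.getD i ' ') else none)

def maxLen (lines : List String) : Nat := lines.foldl (fun a line => max a line.toList.length) 0

-- Pre_ excludes exactly the inputs where the Python A raises: the empty list (max() ValueError)
-- and grids where some column's vertical non-space string is not a valid int literal (int() ValueError).
def Pre_part2 (lines : List String) : Prop :=
  lines ≠ [] ∧ ∀ i ∈ List.range (maxLen lines),
    colChars lines i = [] ∨ (PySem.Int.ofChars? (colChars lines i)).isSome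
instance (lines : List String) : Decidable (Pre_part2 lines) := by unfold Pre_part2; infer_instance

def pvWitness_part2 : List String := ["1 2", "3 4", "+ *"]

def Spec_part2 (lines : List String) (out : Int) : Prop := out = part2_alt lines
instance (lines : List String) (out : Int) : Decidable (Spec_part2 lines out) := by unfold Spec_part2; infer_instance

-- ===== CLAIM (what is proved, stated in full; the proofs are below) =====
def Claim_equal_part2 : Prop := ∀ (lines : List String), Dom_part2 lines → Pre_part2 lines → Spec_part2 lines (part2 lines)

-- ===== LEMMAS AND PROOFS =====

-- abstract per-column view (B's literal per-column expressions, as total functions of the index)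
def dOf (lines : List String) (i : Int) : List Char :=
  lines.dropLast.filterMap (fun row =>
    if i < PySem.Str.len row ∧ PySem.List.pyGetD row.toList i ' ' ≠ ' '
    then some (PySem.List.pyGetD row.toList i ' ') else none)

def oOf (lines : List String) (i : Int) : Char :=
  if i < PySem.Str.len ((PySem.List.pyGet? lines (-1)).getD "")
  then PySem.List.pyGetD ((PySem.List.pyGet? lines (-1)).getD "").toList i ' ' else ' '

def isOpC (c : Char) : Bool := c == '+' || c == '*'

def flushG (op : Option Char) (nums : List Int) : Int :=
  if nums.isEmpty then 0 else applyOp (op.getD '+') nums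

-- the one-pass recursion both sides are reduced to
def RI (d : Int → List Char) (o : Int → Char) (n : Int) (op : Option Char) (nums : List Int) (i : Int) : Int :=
  if h : i < n then
    if (d i).isEmpty then flushG op nums + RI d o n none [] (i + 1)
    else RI d o n (if op.isNone && isOpC (o i) then some (o i) else op)
           (nums ++ [(PySem.Int.ofChars? (d i)).getD 0]) (i + 1)
  else flushG op nums
termination_by (n - i).toNat
decreasing_by all_goals omega

def stepG (d : Int → List Char) (o : Int → Char) (st : Int × Option Char × List Int) (i : Int) :
    Int × Option Char × List Int :=
  if (d i).isEmpty then
    (if !st.2.2.isEmpty then st.1 + applyOp (st.2.1.getD '+') st.2.2 else st.1, none, [])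
  else
    (st.1, if st.2.1.isNone && isOpC (o i) then some (o i) else st.2.1,
     st.2.2 ++ [(PySem.Int.ofChars? (d i)).getD 0])

def rangesOf (d : Int → List Char) (n : Int) (s : Int) : List (Int × Int) :=
  let pr := ((PySem.List.pyRange s n).filter (fun i => (d i).isEmpty)).foldl
      (fun (p : List (Int × Int) × Int) e => (if p.2 < e then p.1 ++ [(p.2, e - 1)] else p.1, e + 1)) ([], s)
  if pr.2 < n then pr.1 ++ [(pr.2, n - 1)] else pr.1

def fRange (d : Int → List Char) (o : Int → Char) (se : Int × Int) : Int :=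
  computeResult
    (((PySem.List.pyRange se.1 (se.2 + 1)).filter (fun i => !(d i).isEmpty)).map
        (fun i => (PySem.Int.ofChars? (d i)).getD 0))
    (((PySem.List.pyRange se.1 (se.2 + 1)).findSome? (fun i =>
        if isOpC (o i) then some (o i) else none)).getD '+')

def opUpd (o : Int → Char) (op : Option Char) (s : Int) : Nat → Option Char
  | 0 => op
  | (k + 1) => opUpd o (if op.isNone && isOpC (o s) then some (o s) else op) (s + 1) k

def numsOf (d : Int → List Char) (s : Int) : Nat → List Int
  | 0 => []
  | (k + 1) => (PySem.Int.ofChars? (d s)).getD 0 :: numsOf d (s + 1) k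

-- ---- small utility lemmas ----

theorem applyOp_eq_compute (c : Char) (ns : List Int) : applyOp c ns = computeResult ns c := rfl

theorem findSome?_congr_mem {α β : Type} (l : List α) (f g : α → Option β)
    (h : ∀ x ∈ l, f x = g x) : l.findSome? f = l.findSome? g := by
  induction l with
  | nil => rfl
  | cons x t ih =>
    simp only [List.findSome?_cons, h x (by simp)]
    cases g x with
    | none => exact ih (fun y hy => h y (by simp [hy]))
    | some b => rfl

theorem filter_nonspace_isEmpty (xs : List Char) :
    (xs.filter (fun c => !(c == ' '))).isEmpty = xs.all (fun c => c == ' ') := by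
  induction xs with
  | nil => rfl
  | cons x t ih =>
    by_cases hx : x = ' ' <;> simp [List.all_cons, hx, ih]

theorem foldB (d : Int → List Char) (o : Int → Char) (n : Int) (m : Nat) :
    ∀ (i : Int) (t : Int) (op : Option Char) (nums : List Int), 0 ≤ i → (n - i).toNat ≤ m →
      (let st := (PySem.List.pyRange i n).foldl (stepG d o) (t, op, nums)
       if !st.2.2.isEmpty then st.1 + applyOp (st.2.1.getD '+') st.2.2 else st.1)
        = t + RI d o n op nums i := by
  induction m with
  | zero =>
    intro i t op nums hi hm
    rw [PySem.List.pyRange_one_eq_nil (by omega), RI, dif_neg (by omega)]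
    simp only [List.foldl_nil, flushG]
    by_cases h : nums.isEmpty <;> simp [h, applyOp_eq_compute]
  | succ m ih =>
    intro i t op nums hi hm
    by_cases hlt : i < n
    · rw [PySem.List.pyRange_one_cons hlt, RI, dif_pos hlt]
      simp only [List.foldl_cons]
      by_cases he : (d i).isEmpty
      · simp only [stepG, if_pos he]
        rw [ih (i+1) _ none [] (by omega) (by omega)]
        simp only [flushG]
        by_cases h : nums.isEmpty <;> simp [h] <;> ring
      · simp only [stepG, if_neg he]
        rw [ih (i+1) _ _ _ (by omega) (by omega)]
    · rw [PySem.List.pyRange_one_eq_nil (by omega), RI, dif_neg hlt]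
      simp only [List.foldl_nil, flushG]
      by_cases h : nums.isEmpty <;> simp [h]

-- generalized fold-accumulator lemma for the ranges fold
theorem rangesFold_acc (E : List Int) :
    ∀ (acc : List (Int × Int)) (st : Int),
      E.foldl (fun (p : List (Int × Int) × Int) e =>
          (if p.2 < e then p.1 ++ [(p.2, e - 1)] else p.1, e + 1)) (acc, st)
        = (acc ++ (E.foldl (fun (p : List (Int × Int) × Int) e =>
            (if p.2 < e then p.1 ++ [(p.2, e - 1)] else p.1, e + 1)) ([], st)).1,
           (E.foldl (fun (p : List (Int × Int) × Int) e =>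
            (if p.2 < e then p.1 ++ [(p.2, e - 1)] else p.1, e + 1)) ([], st)).2) := by
  induction E with
  | nil => simp
  | cons e t ih =>
    intro acc st
    simp only [List.foldl_cons]
    by_cases h : st < e
    · simp only [if_pos h]
      rw [ih (acc ++ [(st, e - 1)]) (e + 1)]
      conv_rhs => rw [ih ([] ++ [(st, e - 1)]) (e + 1)]
      simp
    · simp only [if_neg h]
      exact ih acc (e + 1)

theorem RI_run (d : Int → List Char) (o : Int → Char) (n : Int) (k : Nat) :
    ∀ (s : Int) (op : Option Char) (nums : List Int), s + (k : Int) ≤ n →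
      (∀ j : Nat, j < k → (d (s + (j : Int))).isEmpty = false) →
      RI d o n op nums s = RI d o n (opUpd o op s k) (nums ++ numsOf d s k) (s + (k : Int)) := by
  induction k with
  | zero => intro s op nums _ _; simp [opUpd, numsOf]
  | succ k ih =>
    intro s op nums hle hne
    rw [RI]
    have hs : s < n := by push_cast at hle; omega
    rw [dif_pos hs]
    have h0 : (d s).isEmpty = false := by
      have := hne 0 (Nat.succ_pos k); simpa using this
    rw [if_neg (by simp [h0])]
    have harith : s + ((k+1 : Nat) : Int) = (s + 1) + (k : Int) := by push_cast; ring
    rw [ih (s + 1) _ _ (by omega) (fun j hj => by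
      have := hne (j + 1) (by omega)
      have e : s + 1 + (j : Int) = s + ((j + 1 : Nat) : Int) := by push_cast; ring
      rw [e]; exact this)]
    rw [harith]
    simp [opUpd, numsOf]

theorem numsOf_eq (d : Int → List Char) (k : Nat) :
    ∀ s : Int, (PySem.List.pyRange s (s + (k : Int))).map (fun i => (PySem.Int.ofChars? (d i)).getD 0)
      = numsOf d s k := by
  induction k with
  | zero =>
    intro s
    rw [PySem.List.pyRange_one_eq_nil (by omega : s + ((0:Nat):Int) ≤ s)]
    rfl
  | succ k ih =>
    intro s
    rw [PySem.List.pyRange_one_cons (by push_cast; omega)]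
    simp only [List.map_cons, numsOf]
    congr 1
    have : s + ((k+1 : Nat) : Int) = (s + 1) + (k : Int) := by push_cast; ring
    rw [this]
    exact ih (s + 1)

theorem opUpd_some (o : Int → Char) (a : Char) (k : Nat) :
    ∀ s : Int, opUpd o (some a) s k = some a := by
  induction k with
  | zero => intro s; rfl
  | succ k ih => intro s; simp [opUpd, ih]

theorem opUpd_eq_findSome? (o : Int → Char) (k : Nat) :
    ∀ s : Int, opUpd o none s k
      = (PySem.List.pyRange s (s + (k : Int))).findSome? (fun i => if isOpC (o i) then some (o i) else none) := by
  induction k with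
  | zero =>
    intro s
    rw [PySem.List.pyRange_one_eq_nil (by omega : s + ((0:Nat):Int) ≤ s)]
    simp [opUpd]
  | succ k ih =>
    intro s
    rw [PySem.List.pyRange_one_cons (by push_cast; omega)]
    simp only [List.findSome?_cons]
    have harith : s + ((k+1 : Nat) : Int) = (s + 1) + (k : Int) := by push_cast; ring
    by_cases h : isOpC (o s) = true
    · simp only [h, if_pos rfl]
      simp only [opUpd, Option.isNone_none, Bool.true_and, h]
      exact opUpd_some o (o s) k (s + 1)
    · simp only [h]
      simp only [opUpd, Option.isNone_none, Bool.true_and, h]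
      rw [harith]
      simpa using ih (s + 1)

theorem numsOf_ne_nil (d : Int → List Char) (s : Int) (k : Nat) (hk : 0 < k) :
    (numsOf d s k).isEmpty = false := by
  cases k with
  | zero => omega
  | succ k => rfl

theorem fRange_run (d : Int → List Char) (o : Int → Char) (s : Int) (k : Nat) (hk : 0 < k)
    (hne : ∀ j : Nat, j < k → (d (s + (j : Int))).isEmpty = false) :
    fRange d o (s, s + (k : Int) - 1) = flushG (opUpd o none s k) (numsOf d s k) := by
  unfold fRange
  have he : s + (k : Int) - 1 + 1 = s + (k : Int) := by ring
  rw [he]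
  have hfilter : (PySem.List.pyRange s (s + (k : Int))).filter (fun i => !(d i).isEmpty)
      = PySem.List.pyRange s (s + (k : Int)) := by
    rw [List.filter_eq_self]
    intro i hi
    have hb := PySem.List.mem_pyRange_one.1 hi
    have hj : i = s + (((i - s).toNat : Nat) : Int) := by omega
    have hf := hne (i - s).toNat (by omega)
    rw [← hj] at hf
    simp [hf]
  rw [hfilter, numsOf_eq, ← opUpd_eq_findSome?]
  rw [flushG, if_neg (by simp [numsOf_ne_nil d s k hk]), applyOp_eq_compute]

theorem Aside (d : Int → List Char) (o : Int → Char) (n : Int) (m : Nat) :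
    ∀ s : Int, 0 ≤ s → s ≤ n → (n - s).toNat ≤ m →
      ((rangesOf d n s).map (fRange d o)).sum = RI d o n none [] s := by
  induction m with
  | zero =>
    intro s h0 hsn hm
    have hs : s = n := by omega
    subst hs
    rw [RI, dif_neg (by omega)]
    simp [rangesOf, PySem.List.pyRange_one_eq_nil le_rfl, flushG]
  | succ m ih =>
    intro s h0 hsn hm
    by_cases hex : ∃ j : Nat, s + (j : Int) < n ∧ (d (s + (j : Int))).isEmpty = true
    · obtain ⟨hk0lt, hk0emp⟩ := Nat.find_spec hex
      set k0 : Nat := Nat.find hex with hk0def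
      have hnb : ∀ j : Nat, j < k0 → (d (s + (j : Int))).isEmpty = false := by
        intro j hj
        have hmin := Nat.find_min hex hj
        push_neg at hmin
        by_cases hjn : s + (j : Int) < n
        · simpa using hmin hjn
        · omega
      set k : Int := s + (k0 : Int) with hkdef
      have hsk : s ≤ k := by omega
      have hkn : k < n := hk0lt
      have hsplit : (PySem.List.pyRange s n).filter (fun i => (d i).isEmpty)
          = k :: (PySem.List.pyRange (k + 1) n).filter (fun i => (d i).isEmpty) := by
        rw [PySem.List.pyRange_one_append s k n hsk (by omega), List.filter_append]
        have h1 : (PySem.List.pyRange s k).filter (fun i => (d i).isEmpty) = [] := by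
          rw [List.filter_eq_nil_iff]
          intro i hi
          have hb := PySem.List.mem_pyRange_one.1 hi
          have hj : i = s + (((i - s).toNat : Nat) : Int) := by omega
          have hf := hnb (i - s).toNat (by omega)
          rw [← hj] at hf
          simp [hf]
        rw [h1, PySem.List.pyRange_one_cons (by omega), List.filter_cons, if_pos hk0emp]
        rfl
      have hacc : rangesOf d n s
          = (if s < k then [(s, k - 1)] else []) ++ rangesOf d n (k + 1) := by
        unfold rangesOf
        rw [hsplit]
        simp only [List.foldl_cons]
        by_cases hsk' : s < k
        · rw [if_pos hsk']
          rw [show (([] : List (Int × Int)) ++ [(s, k - 1)] = [(s, k - 1)]) from rfl] at *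
          rw [rangesFold_acc _ [(s, k - 1)] (k + 1)]
          by_cases hfin : (List.foldl (fun (p : List (Int × Int) × Int) e =>
              (if p.2 < e then p.1 ++ [(p.2, e - 1)] else p.1, e + 1)) ([], k + 1)
              ((PySem.List.pyRange (k + 1) n).filter (fun i => (d i).isEmpty))).2 < n
          · simp only [if_pos hfin]
            simp [hsk']
          · simp only [if_neg hfin]
            simp [hsk']
        · rw [if_neg hsk']
          simp [hsk']
      rw [hacc, List.map_append, List.sum_append]
      rw [ih (k + 1) (by omega) (by omega) (by omega)]
      by_cases hsk' : s < k
      · rw [if_pos hsk']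
        have hk0pos : 0 < k0 := by omega
        have hrun := RI_run d o n k0 s none [] (by omega) hnb
        have hkemp' : (d (s + (k0 : Int))).isEmpty = true := by rw [← hkdef]; exact hk0emp
        conv_rhs => rw [hrun, RI, dif_pos (by omega : s + (k0 : Int) < n), if_pos hkemp']
        have hfr : fRange d o (s, k - 1) = flushG (opUpd o none s k0) (numsOf d s k0) := by
          have : k - 1 = s + (k0 : Int) - 1 := by omega
          rw [this]
          exact fRange_run d o s k0 hk0pos hnb
        simp only [List.map_cons, List.map_nil, List.sum_cons, List.sum_nil, List.nil_append]
        rw [hfr, ← hkdef]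
        omega
      · rw [if_neg hsk']
        have hs_eq : k = s := by omega
        have hsemp : (d s).isEmpty = true := by
          rw [show s = s + ((k0 : Nat) : Int) by omega]; exact hk0emp
        conv_rhs => rw [RI, dif_pos (by omega : s < n), if_pos hsemp]
        have : flushG none [] = 0 := rfl
        rw [this, show k + 1 = s + 1 by omega]
        simp
    · push_neg at hex
      have hnb : ∀ j : Nat, s + (j : Int) < n → (d (s + (j : Int))).isEmpty = false := by
        intro j hj
        simpa using hex j hj
      have hnil : (PySem.List.pyRange s n).filter (fun i => (d i).isEmpty) = [] := by
        rw [List.filter_eq_nil_iff]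
        intro i hi
        have hb := PySem.List.mem_pyRange_one.1 hi
        have hj : i = s + (((i - s).toNat : Nat) : Int) := by omega
        have hf := hnb (i - s).toNat (by omega : s + (((i - s).toNat : Nat) : Int) < n)
        rw [← hj] at hf
        simp [hf]
      unfold rangesOf
      rw [hnil]
      simp only [List.foldl_nil]
      by_cases hsn' : s < n
      · rw [if_pos hsn']
        set k0 : Nat := (n - s).toNat with hk0
        have hk0pos : 0 < k0 := by omega
        have hrun := RI_run d o n k0 s none [] (by omega) (fun j hj => hnb j (by omega))
        conv_rhs => rw [hrun, RI, dif_neg (by omega : ¬ s + ((n - s).toNat : Int) < n)]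
        have hfl : flushG (opUpd o none s k0) ([] ++ numsOf d s k0)
            = fRange d o (s, n - 1) := by
          rw [List.nil_append]
          rw [show (n - 1) = s + (k0 : Int) - 1 by omega]
          rw [fRange_run d o s k0 hk0pos (fun j hj => hnb j (by omega))]
        rw [hfl]
        simp
      · rw [if_neg hsn']
        rw [RI, dif_neg (by omega)]
        rfl

theorem foldmax_cast (t : List String) : ∀ a : Nat,
    (t.map (fun line => PySem.Str.len line)).foldl max ((a : Nat) : Int)
      = ((t.foldl (fun a line => max a line.toList.length) a : Nat) : Int) := by
  induction t with
  | nil => intro a; rfl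
  | cons x t ih =>
    intro a
    simp only [List.map_cons, List.foldl_cons, PySem.Str.len_eq]
    rw [show max ((a : Nat) : Int) ((x.toList.length : Nat) : Int) = (((max a x.toList.length : Nat)) : Int) by push_cast; rfl]
    exact ih _

theorem maxcol_eq (lines : List String) (h : lines ≠ []) :
    (PySem.List.max? (lines.map (fun line => PySem.Str.len line)) (fun x => x)).getD 0
      = ((maxLen lines : Nat) : Int) := by
  cases lines with
  | nil => exact absurd rfl h
  | cons x t =>
    rw [List.map_cons, PySem.List.max?_id_cons]
    unfold maxLen
    simp only [Option.getD_some, List.foldl_cons]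
    rw [show PySem.Str.len x = ((x.toList.length : Nat) : Int) from PySem.Str.len_eq x]
    rw [foldmax_cast, Nat.zero_max]

theorem pyGetD_nonneg {α : Type} (l : List α) (i : Int) (h : 0 ≤ i) (d : α) :
    PySem.List.pyGetD l i d = l.getD i.toNat d := by
  conv_lhs => rw [show i = ((i.toNat : Nat) : Int) by omega]
  rw [PySem.List.pyGetD_natCast]

theorem padGetD (l : List Char) (N i : Nat) (h : i < N) :
    (l ++ List.replicate (N - l.length) ' ').getD i ' ' = l.getD i ' ' := by
  rcases lt_or_ge i l.length with hl | hl
  · rw [List.getD_eq_getElem?_getD, List.getElem?_append_left hl, ← List.getD_eq_getElem?_getD]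
  · rw [List.getD_eq_getElem?_getD, List.getElem?_append_right hl, List.getElem?_replicate,
      List.getD_eq_default _ _ hl]
    rw [if_pos (by omega)]
    rfl

theorem colfilter (rows : List String) (j : Nat) :
    (rows.map (fun l => l.toList.getD j ' ')).filter (fun c => !(c == ' '))
      = rows.filterMap (fun row =>
          if j < row.toList.length ∧ row.toList.getD j ' ' ≠ ' '
          then some (row.toList.getD j ' ') else none) := by
  induction rows with
  | nil => rfl
  | cons row t ih =>
    simp only [List.map_cons, List.filter_cons, List.filterMap_cons]
    by_cases h1 : row.toList.getD j ' ' = ' '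
    · rw [if_neg (show ¬ ((!(row.toList.getD j ' ' == ' ')) = true) by simp [← List.getD_eq_getElem?_getD, h1]),
        if_neg (show ¬ (j < row.toList.length ∧ row.toList.getD j ' ' ≠ ' ') by simp [← List.getD_eq_getElem?_getD, h1])]
      simpa using ih
    · have hlen : j < row.toList.length := by
        by_contra hc
        exact h1 (List.getD_eq_default _ _ (by omega))
      rw [if_pos (show (!(row.toList.getD j ' ' == ' ')) = true by simp [← List.getD_eq_getElem?_getD, h1]),
        if_pos (⟨hlen, h1⟩ : j < row.toList.length ∧ row.toList.getD j ' ' ≠ ' ')]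
      simpa using ih

theorem dOf_nonneg (lines : List String) (i : Int) (h0 : 0 ≤ i) :
    dOf lines i = colChars lines i.toNat := by
  unfold dOf colChars
  apply List.filterMap_congr
  intro row _
  rw [pyGetD_nonneg _ _ h0, PySem.Str.len_eq]
  by_cases hc : i.toNat < row.toList.length ∧ row.toList.getD i.toNat ' ' ≠ ' '
  · rw [if_pos ⟨by omega, hc.2⟩, if_pos hc]
  · rw [if_neg (fun hcon => hc ⟨by omega, hcon.2⟩), if_neg hc]

theorem oOf_eq (lines : List String) (h : lines ≠ []) (i : Int) (h0 : 0 ≤ i) :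
    oOf lines i = (lines.getLast h).toList.getD i.toNat ' ' := by
  unfold oOf
  rw [PySem.List.pyGet?_neg_one, List.getLast?_eq_getLast h, Option.getD_some]
  by_cases hc : i < PySem.Str.len (lines.getLast h)
  · rw [if_pos hc, pyGetD_nonneg _ _ h0]
  · rw [if_neg hc]
    rw [PySem.Str.len_eq] at hc
    rw [List.getD_eq_default _ _ (by omega)]

theorem colA_eq (lines : List String) (h : lines ≠ []) (N : Nat) (i : Int) (h0 : 0 ≤ i) (hn : i < (N : Int)) :
    (PySem.List.pyRange 0 ((lines.length : Int) - 1)).map (fun row =>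
        PySem.List.pyGetD (PySem.List.pyGetD
          (lines.map (fun line => line.toList ++ List.replicate (N - line.toList.length) ' ')) row [])
          i ' ')
      = lines.dropLast.map (fun l => l.toList.getD i.toNat ' ') := by
  have hpos : 0 < lines.length := List.length_pos_of_ne_nil h
  rw [show (lines.length : Int) - 1 = ((lines.length - 1 : Nat) : Int) by omega,
    PySem.List.pyRange_zero_nat, List.map_map]
  apply List.ext_getElem
  · simp
  · intro k hk1 hk2
    simp only [List.getElem_map, List.getElem_range, Function.comp_apply]
    have hklt : k < lines.length := by
      simp only [List.length_map, List.length_range] at hk1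
      omega
    rw [PySem.List.pyGetD_natCast, List.getD_eq_getElem _ _ (by simpa using hklt), List.getElem_map]
    rw [pyGetD_nonneg _ _ h0, padGetD _ N _ (by omega), List.getElem_dropLast]

theorem oprow_eq (lines : List String) (h : lines ≠ []) (N : Nat) (i : Int) (h0 : 0 ≤ i) (hn : i < (N : Int)) :
    PySem.List.pyGetD (PySem.List.pyGetD
        (lines.map (fun line => line.toList ++ List.replicate (N - line.toList.length) ' ')) (-1) []) i ' '
      = oOf lines i := by
  have hmapne : lines.map (fun line => line.toList ++ List.replicate (N - line.toList.length) ' ') ≠ [] := by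
    simp [h]
  rw [PySem.List.pyGetD_neg_one _ _ hmapne, List.getLast_map, pyGetD_nonneg _ _ h0,
    padGetD _ N _ (by omega), oOf_eq lines h i h0]

theorem num_str_eq (lines : List String) (h : lines ≠ []) (i : Int) (h0 : 0 ≤ i) (hn : i < ((maxLen lines : Nat) : Int)) :
    ((PySem.List.pyRange 0 ((lines.length : Int) - 1)).map (fun row =>
        PySem.List.pyGetD (PySem.List.pyGetD
          (lines.map (fun line => line.toList ++ List.replicate (maxLen lines - line.toList.length) ' ')) row [])
          i ' ')).filter (fun c => !(c == ' '))
      = dOf lines i := by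
  rw [colA_eq lines h (maxLen lines) i h0 hn, colfilter, dOf_nonneg lines i h0]
  rfl

theorem rangesAux_bound (n : Int) :
    ∀ (E : List Int) (acc : List (Int × Int)) (st : Int),
      E.Pairwise (· < ·) → (∀ e ∈ E, st ≤ e ∧ e < n) → 0 ≤ st → st ≤ n →
      (∀ p ∈ (E.foldl (fun (p : List (Int × Int) × Int) e =>
          (if p.2 < e then p.1 ++ [(p.2, e - 1)] else p.1, e + 1)) (acc, st)).1,
        p ∈ acc ∨ (0 ≤ p.1 ∧ p.2 < n)) ∧
      0 ≤ (E.foldl (fun (p : List (Int × Int) × Int) e =>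
          (if p.2 < e then p.1 ++ [(p.2, e - 1)] else p.1, e + 1)) (acc, st)).2 ∧
      (E.foldl (fun (p : List (Int × Int) × Int) e =>
          (if p.2 < e then p.1 ++ [(p.2, e - 1)] else p.1, e + 1)) (acc, st)).2 ≤ n := by
  intro E
  induction E with
  | nil =>
    intro acc st _ _ h0 hn
    exact ⟨fun p hp => Or.inl hp, h0, hn⟩
  | cons e t ih =>
    intro acc st hpw hmem h0 hn
    simp only [List.foldl_cons]
    have he := hmem e (by simp)
    have hpw' := (List.pairwise_cons.1 hpw)
    have ihr := ih (if st < e then acc ++ [(st, e - 1)] else acc) (e + 1) hpw'.2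
      (fun e' he' => ⟨by have := hpw'.1 e' he'; omega, (hmem e' (by simp [he'])).2⟩)
      (by omega) (by omega)
    refine ⟨fun p hp => ?_, ihr.2⟩
    rcases ihr.1 p hp with hin | hgood
    · by_cases hst : st < e
      · rw [if_pos hst] at hin
        rcases List.mem_append.1 hin with h1 | h2
        · exact Or.inl h1
        · simp only [List.mem_singleton] at h2
          subst h2
          exact Or.inr ⟨by omega, by omega⟩
      · rw [if_neg hst] at hin
        exact Or.inl hin
    · exact Or.inr hgood

theorem rangesOf_bounds (d : Int → List Char) (n : Int) (hn : 0 ≤ n) :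
    ∀ p ∈ rangesOf d n 0, 0 ≤ p.1 ∧ p.2 < n := by
  unfold rangesOf
  have hpw : ((PySem.List.pyRange 0 n).filter (fun i => (d i).isEmpty)).Pairwise (· < ·) :=
    (PySem.List.pairwise_lt_pyRange_one 0 n).filter _
  have hmem : ∀ e ∈ (PySem.List.pyRange 0 n).filter (fun i => (d i).isEmpty), (0:Int) ≤ e ∧ e < n := by
    intro e he
    have := PySem.List.mem_pyRange_one.1 (List.mem_of_mem_filter he)
    exact this
  have hb := rangesAux_bound n ((PySem.List.pyRange 0 n).filter (fun i => (d i).isEmpty)) [] 0 hpw hmem le_rfl hn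
  intro p hp
  by_cases hfin : (((PySem.List.pyRange 0 n).filter (fun i => (d i).isEmpty)).foldl
      (fun (p : List (Int × Int) × Int) e =>
        (if p.2 < e then p.1 ++ [(p.2, e - 1)] else p.1, e + 1)) ([], 0)).2 < n
  · rw [if_pos hfin] at hp
    rcases List.mem_append.1 hp with h1 | h2
    · rcases hb.1 p h1 with hin | hgood
      · simp at hin
      · exact hgood
    · simp at h2
      rw [h2]
      exact ⟨hb.2.1, by omega⟩
  · rw [if_neg hfin] at hp
    rcases hb.1 p hp with hin | hgood
    · simp at hin
    · exact hgood

theorem mapfilter_congr {α β : Type} (l : List α) (p p' : α → Bool) (f f' : α → β)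
    (hp : ∀ x ∈ l, p x = p' x) (hf : ∀ x ∈ l, f x = f' x) :
    (l.filter p).map f = (l.filter p').map f' := by
  rw [List.filter_congr hp]
  exact List.map_congr_left (fun x hx => hf x (List.mem_of_mem_filter hx))

theorem A_reshape (lines : List String) (h : lines ≠ []) :
    part2 lines = ((rangesOf (dOf lines) ((maxLen lines : Int)) 0).map (fRange (dOf lines) (oOf lines))).sum := by
  have hn0 : (0:Int) ≤ ((maxLen lines : Nat) : Int) := by positivity
  simp only [part2]
  rw [maxcol_eq lines h]
  simp only [List.length_map, Int.toNat_natCast]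
  rw [PySem.List.foldl_append_if]
  simp only [List.nil_append, List.map_id']
  have hfil : ∀ i ∈ PySem.List.pyRange 0 ((maxLen lines : Nat) : Int),
      (((PySem.List.pyRange 0 ((lines.length : Int) - 1)).map (fun row =>
          PySem.List.pyGetD (PySem.List.pyGetD
            (lines.map (fun line => line.toList ++ List.replicate (maxLen lines - line.toList.length) ' ')) row [])
            i ' ')).all (fun c => c == ' '))
        = (dOf lines i).isEmpty := by
    intro i hi
    have hb := PySem.List.mem_pyRange_one.1 hi
    rw [← filter_nonspace_isEmpty, num_str_eq lines h i hb.1 hb.2]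
  rw [List.filter_congr hfil]
  simp only [rangesOf]
  rw [PySem.List.foldl_add, zero_add]
  apply congrArg
  apply List.map_congr_left
  intro se hse
  have hbnd : 0 ≤ se.1 ∧ se.2 < ((maxLen lines : Nat) : Int) :=
    rangesOf_bounds (dOf lines) _ hn0 se hse
  have hmem : ∀ i ∈ PySem.List.pyRange se.1 (se.2 + 1), 0 ≤ i ∧ i < ((maxLen lines : Nat) : Int) := by
    intro i hi
    have := PySem.List.mem_pyRange_one.1 hi
    omega
  unfold fRange
  rw [PySem.List.foldl_append_if]
  simp only [List.nil_append]
  refine congrArg₂ computeResult ?_ ?_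
  · apply mapfilter_congr
    · intro i hi
      obtain ⟨h0, hn⟩ := hmem i hi
      rw [num_str_eq lines h i h0 hn]
    · intro i hi
      obtain ⟨h0, hn⟩ := hmem i hi
      rw [num_str_eq lines h i h0 hn]
  · refine congrArg (fun z => Option.getD z '+') ?_
    apply findSome?_congr_mem
    intro i hi
    obtain ⟨h0, hn⟩ := hmem i hi
    rw [oprow_eq lines h (maxLen lines) i h0 hn]
    rfl

theorem B_reshape (lines : List String) (h : lines ≠ []) :
    part2_alt lines = RI (dOf lines) (oOf lines) ((maxLen lines : Int)) none [] 0 := by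
  unfold part2_alt
  rw [maxcol_eq lines h]
  have hb := foldB (dOf lines) (oOf lines) ((maxLen lines : Int)) (maxLen lines)
      0 0 none [] le_rfl (by omega)
  rw [zero_add] at hb
  exact hb

-- ===== VERDICT (by name: the statement is the Claim_ definition above) =====
theorem part2_spec : Claim_equal_part2 := by
  intro lines _ hpre
  unfold Spec_part2
  rw [A_reshape lines hpre.1, B_reshape lines hpre.1]
  exact Aside _ _ _ ((maxLen lines : Int) - 0).toNat 0 le_rfl (by positivity) le_rfl
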